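-- pv_equiv track=rewrite | github.com/ukt1997/Coding-Days | Work.tech/k-substring-vowels.py | kSubstringVowels
-- ===== SOURCE A (Python) =====
-- from typing import List
--
-- def kSubstringVowels(s: str, k: int) -> List[int]:
-- 	# add your logic here
-- 	out = []
-- 	cnt = 0
-- 	for i in range(0,k):
-- 		if s[i] in 'aeiou':
-- 			cnt += 1
-- 	out.append(cnt)
--
-- 	n = len(s)
-- 	for i in range(k,n):
-- 		if s[i-k] in 'aeiou':
-- 			cnt -= 1
-- 		if s[i] in 'aeiou':
-- 			cnt += 1
-- 		out.append(cnt)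
-- 	return out
-- ===== SOURCE B (Python) =====
-- from typing import List
--
-- def kSubstringVowels(s: str, k: int) -> List[int]:
--     # Prefix-sum table: P[i] = number of vowels among s[:i].
--     P = [0]
--     for c in s:
--         P.append(P[-1] + (1 if c in 'aeiou' else 0))
--     out = [P[k] - P[0]]
--     for i in range(k, len(s)):
--         out.append(P[i + 1] - P[i + 1 - k])
--     return out
-- ===== Notes on version B (the rewrite author's own statement) =====
-- stated objective: alternative
-- what changed: Replaces A's sliding add/subtract running counter with a precomputed prefix-sum table of vowel counts; each window count becomes a difference of two table lookups.
import Mathlib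
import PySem

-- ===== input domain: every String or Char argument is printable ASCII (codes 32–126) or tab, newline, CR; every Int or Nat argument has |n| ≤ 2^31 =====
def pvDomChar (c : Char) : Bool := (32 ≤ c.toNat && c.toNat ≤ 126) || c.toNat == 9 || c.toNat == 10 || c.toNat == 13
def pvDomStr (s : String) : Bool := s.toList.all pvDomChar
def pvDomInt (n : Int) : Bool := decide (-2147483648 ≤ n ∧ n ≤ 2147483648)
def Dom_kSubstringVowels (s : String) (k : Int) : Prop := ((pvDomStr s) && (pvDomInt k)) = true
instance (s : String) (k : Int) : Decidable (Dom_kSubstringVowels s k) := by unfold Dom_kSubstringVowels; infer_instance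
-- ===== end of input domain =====

-- B replaces A's sliding add/subtract running counter with a prefix-sum table of vowel
-- counts, each window count becoming a difference of two table lookups (alternative algorithm, same cost).


-- ===== PORT A =====
-- `c in 'aeiou'` (identical test in both Python sources)
def pvIsVowel (c : Char) : Bool := c ∈ ['a', 'e', 'i', 'o', 'u']

def kSubstringVowels (s : String) (k : Int) : List Int :=
  let cs := s.toList
  -- first loop: count vowels among s[0:k]
  let cnt : Int := (PySem.List.pyRange 0 k 1).foldl
    (fun cnt i => if pvIsVowel (PySem.List.pyGetD cs i ' ') then cnt + 1 else cnt) 0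
  let n : Int := (cs.length : Int)
  -- second loop: slide the window, appending the running count
  let r := (PySem.List.pyRange k n 1).foldl
    (fun (st : List Int × Int) i =>
      let c1 : Int := if pvIsVowel (PySem.List.pyGetD cs (i - k) ' ') then st.2 - 1 else st.2
      let c2 : Int := if pvIsVowel (PySem.List.pyGetD cs i ' ') then c1 + 1 else c1
      (st.1 ++ [c2], c2))
    ([cnt], cnt)
  r.1

-- ===== PORT B =====
def kSubstringVowels_alt (s : String) (k : Int) : List Int :=
  let cs := s.toList
  -- P[i] = number of vowels among s[:i]  (P[-1] is Python's last-element index)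
  let P : List Int := cs.foldl
    (fun P c => P ++ [PySem.List.pyGetD P (-1) 0 + (if pvIsVowel c then 1 else 0)]) [0]
  let out : List Int := [PySem.List.pyGetD P k 0 - PySem.List.pyGetD P 0 0]
  (PySem.List.pyRange k (cs.length : Int) 1).foldl
    (fun out i => out ++ [PySem.List.pyGetD P (i + 1) 0 - PySem.List.pyGetD P (i + 1 - k) 0]) out

-- ===== PRECONDITION & SPEC =====
-- A raises IndexError whenever k < 0 or k > len(s); it returns exactly on 0 ≤ k ≤ len(s).
def Pre_kSubstringVowels (s : String) (k : Int) : Prop := 0 ≤ k ∧ k ≤ (s.toList.length : Int)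
instance (s : String) (k : Int) : Decidable (Pre_kSubstringVowels s k) := by unfold Pre_kSubstringVowels; infer_instance
def pvWitness_kSubstringVowels : String × Int := ("aeiXbo", 3)

def Spec_kSubstringVowels (s : String) (k : Int) (out : List Int) : Prop := out = kSubstringVowels_alt s k
instance (s : String) (k : Int) (out : List Int) : Decidable (Spec_kSubstringVowels s k out) := by unfold Spec_kSubstringVowels; infer_instance

-- ===== CLAIM (what is proved, stated in full; the proofs are below) =====
def Claim_equal_kSubstringVowels : Prop := ∀ (s : String) (k : Int), Dom_kSubstringVowels s k → Pre_kSubstringVowels s k → Spec_kSubstringVowels s k (kSubstringVowels s k)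

-- ===== LEMMAS AND PROOFS =====

-- vowel count of the first i characters (the common value both programs compute)
def pvCnt (cs : List Char) (i : Int) : Int := (((cs.take i.toNat).filter pvIsVowel).length : Int)

theorem pvCnt_zero (cs : List Char) : pvCnt cs 0 = 0 := rfl

theorem pvCnt_succ (cs : List Char) (i : Int) (h0 : 0 ≤ i) (h1 : i < (cs.length : Int)) :
    pvCnt cs (i + 1) = pvCnt cs i + (if pvIsVowel (PySem.List.pyGetD cs i ' ') then 1 else 0) := by
  have hn : i.toNat < cs.length := by omega
  have ht : (i + 1).toNat = i.toNat + 1 := by omega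
  have hg : PySem.List.pyGetD cs i ' ' = cs[i.toNat] :=
    PySem.List.pyGetD_eq_getElem cs ' ' h0 h1
  have htake : List.take ((i + 1).toNat) cs = List.take i.toNat cs ++ [cs[i.toNat]] := by
    rw [ht, List.take_add_one, List.getElem?_eq_getElem hn]
    simp
  rw [hg]
  unfold pvCnt
  rw [htake, List.filter_append]
  by_cases hv : pvIsVowel cs[i.toNat] <;> simp [hv]

theorem pvCnt_cons (c : Char) (cs : List Char) (j : Nat) :
    pvCnt (c :: cs) ((j : Int) + 1) = (if pvIsVowel c then 1 else 0) + pvCnt cs (j : Int) := by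
  have ht : ((j : Int) + 1).toNat = j + 1 := by omega
  unfold pvCnt
  rw [ht, List.take_succ_cons, Int.toNat_natCast]
  by_cases hv : pvIsVowel c <;> simp [hv]
  omega

theorem pvPbuild_aux (cs : List Char) : ∀ (acc : List Int) (x : Int),
    cs.foldl (fun P c => P ++ [PySem.List.pyGetD P (-1) 0 + (if pvIsVowel c then 1 else 0)]) (acc ++ [x])
      = acc ++ (List.range (cs.length + 1)).map (fun j : Nat => x + pvCnt cs (j : Int)) := by
  induction cs with
  | nil => intro acc x; simp [pvCnt]
  | cons c cs ih =>
    intro acc x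
    have hstep :
        (acc ++ [x]) ++ [PySem.List.pyGetD (acc ++ [x]) (-1) 0 + (if pvIsVowel c then 1 else 0)]
          = (acc ++ [x]) ++ [x + (if pvIsVowel c then 1 else 0)] := by
      rw [PySem.List.pyGetD_neg_one_append_singleton]
    simp only [List.foldl_cons]
    rw [hstep, ih (acc ++ [x]) (x + (if pvIsVowel c then 1 else 0))]
    rw [List.length_cons, List.append_assoc]
    congr 1
    conv_rhs => rw [List.range_succ_eq_map]
    simp only [List.map_cons, List.map_map, List.singleton_append]
    congr 1
    · simp [pvCnt]
    · congr 1
      funext j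
      simp only [Function.comp_apply, Nat.succ_eq_add_one]
      have hj : ((j + 1 : Nat) : Int) = (j : Int) + 1 := by push_cast; ring
      rw [hj, pvCnt_cons]
      ring

-- the prefix-sum list B builds
theorem pvPbuild (cs : List Char) :
    cs.foldl (fun P c => P ++ [PySem.List.pyGetD P (-1) 0 + (if pvIsVowel c then 1 else 0)]) [0]
      = (List.range (cs.length + 1)).map (fun j : Nat => pvCnt cs (j : Int)) := by
  have h := pvPbuild_aux cs [] 0
  simpa using h

theorem pvP_lookup (cs : List Char) (j : Int) (h0 : 0 ≤ j) (h1 : j ≤ (cs.length : Int)) :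
    PySem.List.pyGetD ((List.range (cs.length + 1)).map (fun j : Nat => pvCnt cs (j : Int))) j 0
      = pvCnt cs j := by
  have hlen : j < (((List.range (cs.length + 1)).map (fun j : Nat => pvCnt cs (j : Int))).length : Int) := by
    simp; omega
  rw [PySem.List.pyGetD_eq_getElem _ 0 h0 hlen]
  simp only [List.getElem_map, List.getElem_range]
  rw [Int.toNat_of_nonneg h0]

-- A's first loop computes pvCnt cs k
theorem pvLoop1 (cs : List Char) (k : Int) (hk : 0 ≤ k) (hkn : k ≤ (cs.length : Int)) :
    (PySem.List.pyRange 0 k 1).foldl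
      (fun cnt i => if pvIsVowel (PySem.List.pyGetD cs i ' ') then cnt + 1 else cnt) 0
      = pvCnt cs k := by
  have hgen : ∀ (m : Nat), (m : Int) ≤ (cs.length : Int) →
      (PySem.List.pyRange 0 (m : Int) 1).foldl
        (fun cnt i => if pvIsVowel (PySem.List.pyGetD cs i ' ') then cnt + 1 else cnt) 0
        = pvCnt cs (m : Int) := by
    intro m
    induction m with
    | zero => intro _; simp [PySem.List.pyRange_one_eq_nil, pvCnt]
    | succ m ih =>
      intro hm
      have hcast : ((m + 1 : Nat) : Int) = (m : Int) + 1 := by push_cast; ring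
      rw [hcast, PySem.List.pyRange_one_succ_right (by omega), List.foldl_append,
        ih (by omega), List.foldl_cons, List.foldl_nil,
        pvCnt_succ cs (m : Int) (by omega) (by omega)]
      split_ifs <;> ring
  have hk' : k = ((k.toNat : Nat) : Int) := by omega
  rw [hk', hgen k.toNat (by omega)]

-- A's second loop, with the sliding-window invariant cnt = pvCnt a - pvCnt (a - k)
theorem pvLoop2 (cs : List Char) (k : Int) (hk : 0 ≤ k) :
    ∀ (fuel : Nat) (a : Int) (out : List Int), k ≤ a → ((cs.length : Int) - a).toNat = fuel →
    ((PySem.List.pyRange a (cs.length : Int) 1).foldl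
      (fun (st : List Int × Int) i =>
        (st.1 ++ [if pvIsVowel (PySem.List.pyGetD cs i ' ') then
            (if pvIsVowel (PySem.List.pyGetD cs (i - k) ' ') then st.2 - 1 else st.2) + 1
          else (if pvIsVowel (PySem.List.pyGetD cs (i - k) ' ') then st.2 - 1 else st.2)],
          if pvIsVowel (PySem.List.pyGetD cs i ' ') then
            (if pvIsVowel (PySem.List.pyGetD cs (i - k) ' ') then st.2 - 1 else st.2) + 1
          else (if pvIsVowel (PySem.List.pyGetD cs (i - k) ' ') then st.2 - 1 else st.2)))
      (out, pvCnt cs a - pvCnt cs (a - k))).1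
    = out ++ (PySem.List.pyRange a (cs.length : Int) 1).map
        (fun i => pvCnt cs (i + 1) - pvCnt cs (i + 1 - k)) := by
  intro fuel
  induction fuel with
  | zero =>
    intro a out hka hfuel
    rw [PySem.List.pyRange_one_eq_nil (by omega)]
    simp
  | succ fuel ih =>
    intro a out hka hfuel
    have ha : a < (cs.length : Int) := by omega
    rw [PySem.List.pyRange_one_cons ha]
    simp only [List.foldl_cons, List.map_cons]
    have h1 := pvCnt_succ cs a (by omega) ha
    have h2 := pvCnt_succ cs (a - k) (by omega) (by omega)
    have hidx : a + 1 - k = a - k + 1 := by ring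
    have hc2 :
        (if pvIsVowel (PySem.List.pyGetD cs a ' ') then
            (if pvIsVowel (PySem.List.pyGetD cs (a - k) ' ') then
              pvCnt cs a - pvCnt cs (a - k) - 1 else pvCnt cs a - pvCnt cs (a - k)) + 1
          else
            (if pvIsVowel (PySem.List.pyGetD cs (a - k) ' ') then
              pvCnt cs a - pvCnt cs (a - k) - 1 else pvCnt cs a - pvCnt cs (a - k)))
          = pvCnt cs (a + 1) - pvCnt cs (a + 1 - k) := by
      rw [hidx, h1, h2]
      split_ifs <;> ring
    rw [hc2, ih (a + 1) (out ++ [pvCnt cs (a + 1) - pvCnt cs (a + 1 - k)]) (by omega) (by omega)]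
    simp

-- ===== VERDICT (by name: the statement is the Claim_ definition above) =====
theorem kSubstringVowels_spec : Claim_equal_kSubstringVowels := by
  intro s k _hdom hpre
  obtain ⟨hk, hkn⟩ := hpre
  unfold Spec_kSubstringVowels
  show kSubstringVowels s k = kSubstringVowels_alt s k
  simp only [kSubstringVowels, kSubstringVowels_alt]
  rw [pvLoop1 s.toList k hk hkn, pvPbuild s.toList]
  have hA := pvLoop2 s.toList k hk ((s.toList.length : Int) - k).toNat k
    [pvCnt s.toList k] le_rfl rfl
  rw [show (k - k : Int) = 0 by ring, pvCnt_zero, sub_zero] at hA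
  rw [hA, PySem.List.foldl_append_singleton_eq_map]
  rw [pvP_lookup s.toList k hk hkn, pvP_lookup s.toList 0 le_rfl (by omega), pvCnt_zero, sub_zero]
  congr 1
  apply List.map_congr_left
  intro i hi
  rw [PySem.List.mem_pyRange_one] at hi
  rw [pvP_lookup s.toList (i + 1) (by omega) (by omega),
    pvP_lookup s.toList (i + 1 - k) (by omega) (by omega)]
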